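-- pv_equiv track=rewrite | github.com/bioroid17/coding-training | Python3/프로그래머스/lv1/1845. 폰켓몬/폰켓몬.py | solution
-- ===== SOURCE A (Python) =====
-- def solution(nums):
--     pokemons = {}
--     for num in nums:
--         if num not in pokemons:
--             pokemons[num] = 1
--         else:
--             pokemons[num] += 1
--     return min(len(nums)//2, len(pokemons.keys()))
-- ===== SOURCE B (Python) =====
-- def solution(nums):
--     s = sorted(nums)
--     distinct = 1 if s else 0
--     for i in range(1, len(s)):
--         if s[i] != s[i - 1]:
--             distinct += 1
--     return min(len(nums) // 2, distinct)
-- ===== Notes on version B (the rewrite author's own statement) =====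
-- stated objective: alternative
-- what changed: Counts distinct values by sorting a copy and counting adjacent changes in one scan, instead of building a frequency dictionary.
import Mathlib
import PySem

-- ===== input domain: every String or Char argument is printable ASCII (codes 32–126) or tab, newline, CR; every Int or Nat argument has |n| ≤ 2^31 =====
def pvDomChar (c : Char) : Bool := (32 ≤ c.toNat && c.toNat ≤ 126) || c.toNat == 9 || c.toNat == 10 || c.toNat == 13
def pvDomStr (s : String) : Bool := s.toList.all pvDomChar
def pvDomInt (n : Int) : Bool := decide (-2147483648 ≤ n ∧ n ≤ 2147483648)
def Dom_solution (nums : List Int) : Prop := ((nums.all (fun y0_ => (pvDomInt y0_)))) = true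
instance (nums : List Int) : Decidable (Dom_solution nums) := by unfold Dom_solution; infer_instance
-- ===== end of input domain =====

-- B counts distinct values by sorting a copy and scanning adjacent pairs, instead of A's frequency dictionary; alternative decomposition, same result.

-- ===== PORT A =====
def solution (nums : List Int) : Int :=
  let pokemons : PySem.Dict Int Int :=
    nums.foldl (fun d num =>
      if d.contains num = false then d.insert num 1
      else d.insert num (d.getD num 0 + 1)) PySem.Dict.empty
  min (PySem.Int.floordiv (nums.length : Int) 2) ((pokemons.keys).length : Int)

-- ===== PORT B =====
-- the 'for i in range(1, len(s))' adjacent-pair scan of Source B, as structural recursion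
def countAdj : List Int → Int
  | [] => 0
  | [_] => 1
  | x :: y :: t => (if x = y then 0 else 1) + countAdj (y :: t)

def solution_alt (nums : List Int) : Int :=
  let s := PySem.List.sorted nums (fun x => x) false
  min (PySem.Int.floordiv (nums.length : Int) 2) (countAdj s)

-- ===== PRECONDITION & SPEC =====
def Spec_solution (nums : List Int) (out : Int) : Prop := out = solution_alt nums
instance (nums : List Int) (out : Int) : Decidable (Spec_solution nums out) := by unfold Spec_solution; infer_instance

-- ===== CLAIM (what is proved, stated in full; the proofs are below) =====
def Claim_equal_solution : Prop := ∀ (nums : List Int), Dom_solution nums → Spec_solution nums (solution nums)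

-- ===== LEMMAS AND PROOFS =====

-- A's dict keys are exactly the distinct elements, first occurrences in order
lemma keysA (nums : List Int) :
    (nums.foldl (fun (d : PySem.Dict Int Int) num =>
      if d.contains num = false then d.insert num 1
      else d.insert num (d.getD num 0 + 1)) PySem.Dict.empty).keys
    = PySem.Set.ofList nums := by
  have h : (fun (d : PySem.Dict Int Int) num =>
      if d.contains num = false then d.insert num 1
      else d.insert num (d.getD num 0 + 1))
      = (fun (d : PySem.Dict Int Int) num =>
        d.insert num (if d.contains num = false then 1 else d.getD num 0 + 1)) := by
    funext d num; split <;> rfl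
  rw [h, PySem.Dict.keys_foldl_insert]
  simp [PySem.Set.update_nil_left]

-- adjacent-change count of a ≤-sorted list is the number of distinct elements
lemma countAdj_sorted (s : List Int) (hs : s.Pairwise (· ≤ ·)) :
    countAdj s = (s.toFinset.card : Int) := by
  induction s with
  | nil => simp [countAdj]
  | cons x t ih =>
    cases t with
    | nil => simp [countAdj]
    | cons y u =>
      have hpt : (y :: u).Pairwise (· ≤ ·) := hs.of_cons
      have ih' := ih hpt
      by_cases hxy : x = y
      · subst hxy
        have : (x :: x :: u).toFinset = (x :: u).toFinset := by
          simp
        rw [countAdj, if_pos rfl, ih', this]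
        ring
      · have hxle : ∀ z ∈ y :: u, x ≤ z := by
          intro z hz; exact (List.pairwise_cons.mp hs).1 z hz
        have hxlt : x < y := lt_of_le_of_ne (hxle y (by simp)) hxy
        have hxnot : x ∉ (y :: u) := by
          intro hmem
          rcases List.mem_cons.mp hmem with h | h
          · exact hxy h
          · have hyz : y ≤ x := (List.pairwise_cons.mp hpt).1 x h
            exact absurd hyz (not_le.mpr hxlt)
        have hcard : (x :: y :: u).toFinset.card = (y :: u).toFinset.card + 1 := by
          rw [List.toFinset_cons, Finset.card_insert_of_notMem (by simpa using hxnot)]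
        rw [countAdj, if_neg hxy, ih', hcard]
        push_cast; ring

lemma distinct_eq (nums : List Int) :
    ((PySem.Set.ofList nums).length : Int)
      = countAdj (PySem.List.sorted nums (fun x => x) false) := by
  set s := PySem.List.sorted nums (fun x => x) false with hsdef
  have hperm : s.Perm nums := PySem.List.sorted_perm nums (fun x => x) false
  have hpw : s.Pairwise (· ≤ ·) := by
    simpa using PySem.List.sorted_pairwise (xs := nums) (key := fun x => x)
  rw [countAdj_sorted s hpw]
  have hfin : (PySem.Set.ofList nums).toFinset = s.toFinset := by
    ext z
    simp [PySem.Set.mem_ofList, hperm.mem_iff]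
  have hnd : (PySem.Set.ofList nums).Nodup := PySem.Set.nodup_ofList nums
  rw [← List.toFinset_card_of_nodup hnd, hfin]

-- ===== VERDICT (by name: the statement is the Claim_ definition above) =====
theorem solution_spec : Claim_equal_solution := by
  intro nums _
  show solution nums = solution_alt nums
  simp only [solution, solution_alt]
  rw [keysA, ← distinct_eq]
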